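-- pv_equiv track=rewrite | github.com/AntoniHerbert/SOworkspace | simulacao.py | aging
-- ===== SOURCE A (Python) =====
-- def aging(reference_sequence, num_frames):
--     frames = {}
--     page_faults = 0
--     ages = {}
--
--     for page in reference_sequence:
--         for frame in frames:
--             ages[frame] >>= 1
--
--         if page not in frames:
--             page_faults += 1
--             if len(frames) >= num_frames:
--                 oldest_page = min(ages, key=ages.get)
--                 del frames[oldest_page]
--                 del ages[oldest_page]
--             frames[page] = True
--             ages[page] = 1 << 7
--         else:
--             ages[page] |= (1 << 7)
--
--     return page_faults
-- ===== SOURCE B (Python) =====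
-- def aging(reference_sequence, num_frames):
--     # Lazy aging: store (register, last_touch_step) per frame and shift on demand,
--     # instead of shifting every frame's register at every reference.
--     frames = {}  # page -> (register, last touch step)
--     page_faults = 0
--     for t, page in enumerate(reference_sequence):
--         entry = frames.get(page)
--         if entry is None:
--             page_faults += 1
--             if len(frames) >= num_frames:
--                 victim = min(frames.items(),
--                              key=lambda kv: kv[1][0] >> (t - kv[1][1]))[0]
--                 del frames[victim]
--             frames[page] = (1 << 7, t)
--         else:
--             reg, last = entry
--             frames[page] = ((reg >> (t - last)) | (1 << 7), t)
--     return page_faults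
-- ===== Notes on version B (the rewrite author's own statement) =====
-- stated objective: alternative
-- what changed: B keeps one (register, last-touch step) pair per resident page and shifts registers lazily on demand (at a hit or while scanning for a victim), replacing A's per-reference loop that shifts every frame's register; victims are found by one min over the frame table only on capacity faults.
import Mathlib
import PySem

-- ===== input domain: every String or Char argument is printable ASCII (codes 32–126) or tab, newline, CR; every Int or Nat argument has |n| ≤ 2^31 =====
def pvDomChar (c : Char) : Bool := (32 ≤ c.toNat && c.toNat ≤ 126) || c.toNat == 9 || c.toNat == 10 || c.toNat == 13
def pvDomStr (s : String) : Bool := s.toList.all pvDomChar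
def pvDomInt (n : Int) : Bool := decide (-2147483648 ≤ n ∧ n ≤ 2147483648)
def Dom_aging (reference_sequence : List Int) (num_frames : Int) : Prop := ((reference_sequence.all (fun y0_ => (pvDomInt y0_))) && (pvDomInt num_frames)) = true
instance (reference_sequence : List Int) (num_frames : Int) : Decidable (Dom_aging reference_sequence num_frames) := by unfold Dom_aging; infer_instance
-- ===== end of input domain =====

-- B replaces A's per-reference shift of every frame's age register by lazily stored
-- (register, last-touch step) pairs that are shifted on demand (objective: alternative algorithm).

-- ===== PORT A =====
-- state: (frames, page_faults, ages).  'ages[frame] >>= 1' is ported with modify/default 0 and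
-- 'min(ages, key=ages.get)' with getD 0: every key of frames is a key of ages on all reachable
-- states, so the defaults are never read.  Python's '>>' on Int is Lean's '>>>', '|' is PySem.Int.bor.
def agingStep (num_frames : Int)
    (s : PySem.Dict Int Bool × Int × PySem.Dict Int Int) (page : Int) :
    PySem.Dict Int Bool × Int × PySem.Dict Int Int :=
  let frames := s.1
  let ages := (frames.keys).foldl (fun d frame => d.modify frame 0 (fun v => v >>> (1 : Nat))) s.2.2
  if frames.contains page = false then
    let faults := s.2.1 + 1
    if num_frames ≤ (frames.size : Int) then
      match PySem.List.min? ages.keys (fun k => ages.getD k 0) with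
      | some oldest => ((frames.erase oldest).insert page true, faults,
                        (ages.erase oldest).insert page (1 <<< 7))
      -- min() of an empty dict: Python raises ValueError here, excluded by Pre_aging
      | none => (frames.insert page true, faults, ages.insert page (1 <<< 7))
    else (frames.insert page true, faults, ages.insert page (1 <<< 7))
  else (frames, s.2.1, ages.modify page 0 (fun v => PySem.Int.bor v (1 <<< 7)))

def aging (reference_sequence : List Int) (num_frames : Int) : Int :=
  (reference_sequence.foldl (agingStep num_frames)
    (PySem.Dict.empty, 0, PySem.Dict.empty)).2.1

-- ===== PORT B =====
-- state: (frames : page -> (register, last touch step), page_faults).  The shift count t - last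
-- is nonnegative on every reachable state, so '.toNat' is exact for Python's 'reg >> (t - last)'.
def agingAltStep (num_frames : Int)
    (s : PySem.Dict Int (Int × Int) × Int) (tp : Int × Int) :
    PySem.Dict Int (Int × Int) × Int :=
  let t := tp.1
  let page := tp.2
  match s.1.get? page with
  | none =>
    let frames :=
      if num_frames ≤ (s.1.size : Int) then
        match (PySem.List.min? s.1.items (fun kv => kv.2.1 >>> (t - kv.2.2).toNat)).map (·.1) with
        | some victim => s.1.erase victim
        -- min() of an empty dict: Python raises ValueError here, excluded by Pre_aging
        | none => s.1
      else s.1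
    (frames.insert page (1 <<< 7, t), s.2 + 1)
  | some entry =>
    (s.1.insert page (PySem.Int.bor (entry.1 >>> (t - entry.2).toNat) (1 <<< 7), t), s.2)

def aging_alt (reference_sequence : List Int) (num_frames : Int) : Int :=
  ((PySem.List.enumerate reference_sequence 0).foldl (agingAltStep num_frames)
    (PySem.Dict.empty, 0)).2

-- ===== PRECONDITION & SPEC =====
-- Pre_ excludes only the inputs on which Python A raises ValueError (min() of the empty age table):
-- a nonempty reference sequence with num_frames ≤ 0; B raises there too.
def Pre_aging (reference_sequence : List Int) (num_frames : Int) : Prop :=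
  reference_sequence = [] ∨ 1 ≤ num_frames
instance (reference_sequence : List Int) (num_frames : Int) : Decidable (Pre_aging reference_sequence num_frames) := by unfold Pre_aging; infer_instance
def pvWitness_aging : List Int × Int := ([1, 2, 1, 3, 2], 2)

def Spec_aging (reference_sequence : List Int) (num_frames : Int) (out : Int) : Prop := out = aging_alt reference_sequence num_frames
instance (reference_sequence : List Int) (num_frames : Int) (out : Int) : Decidable (Spec_aging reference_sequence num_frames out) := by unfold Spec_aging; infer_instance

-- ===== CLAIM (what is proved, stated in full; the proofs are below) =====
def Claim_equal_aging : Prop := ∀ (reference_sequence : List Int) (num_frames : Int), Dom_aging reference_sequence num_frames → Pre_aging reference_sequence num_frames → Spec_aging reference_sequence num_frames (aging reference_sequence num_frames)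

-- ===== LEMMAS AND PROOFS =====

-- The coupling invariant after processing t references: A's two dicts are B's single dict with
-- every register shifted eagerly, entry by entry and in the same insertion order.
def AgingInv (t : Int) (fa : PySem.Dict Int Bool) (ag : PySem.Dict Int Int)
    (fb : PySem.Dict Int (Int × Int)) : Prop :=
  fa.items = fb.items.map (fun p => (p.1, true)) ∧
  ag.items = fb.items.map (fun (p : Int × Int × Int) => (p.1, p.2.1 >>> (t - 1 - p.2.2).toNat)) ∧
  (∀ p ∈ fb.items, p.2.2 ≤ t - 1) ∧
  fb.keys.Nodup

lemma min?_map {α β κ : Type} [LT κ] [DecidableLT κ] (l : List α) (f : α → β) (key : β → κ) :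
    PySem.List.min? (l.map f) key = Option.map f (PySem.List.min? l (fun x => key (f x))) := by
  suffices h : ∀ (acc : Option α),
      List.foldl (fun acc b => match acc with | none => some b | some m => if key b < key m then some b else some m) (Option.map f acc) (l.map f)
        = Option.map f (List.foldl (fun acc x => match acc with | none => some x | some m => if key (f x) < key (f m) then some x else some m) acc l) by
    simpa [PySem.List.min?] using h none
  induction l with
  | nil => intro acc; simp
  | cons x xs ih =>
    intro acc
    cases acc with
    | none => simpa using ih (some x)
    | some m =>
      by_cases hlt : key (f x) < key (f m)
      · simpa [hlt] using ih (some x)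
      · simpa [hlt] using ih (some m)

lemma min?_congr_mem {α κ : Type} [LT κ] [DecidableLT κ] {l : List α} {k1 k2 : α → κ}
    (h : ∀ x ∈ l, k1 x = k2 x) : PySem.List.min? l k1 = PySem.List.min? l k2 := by
  suffices haux : ∀ (acc : Option α), (∀ m, acc = some m → k1 m = k2 m) →
      List.foldl (fun acc x => match acc with | none => some x | some m => if k1 x < k1 m then some x else some m) acc l
        = List.foldl (fun acc x => match acc with | none => some x | some m => if k2 x < k2 m then some x else some m) acc l by
    simpa [PySem.List.min?] using haux none (by simp)
  induction l with
  | nil => intro acc _; simp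
  | cons x xs ih =>
    intro acc hacc
    have hx : k1 x = k2 x := h x (by simp)
    have hxs : ∀ y ∈ xs, k1 y = k2 y := fun y hy => h y (by simp [hy])
    cases acc with
    | none =>
      simp only [List.foldl_cons]
      exact ih hxs (some x) (by intro m hm; cases hm; exact hx)
    | some m =>
      have hm : k1 m = k2 m := hacc m rfl
      simp only [List.foldl_cons, hx, hm]
      split
      · exact ih hxs (some x) (by intro m' hm'; cases hm'; exact hx)
      · exact ih hxs (some m) (by intro m' hm'; cases hm'; exact hm)

lemma items_modify_present (d : PySem.Dict Int Int) (k : Int) (f : Int → Int)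
    (hc : d.contains k = true) (hnd : d.keys.Nodup) :
    (d.modify k 0 f).items = d.items.map (fun p => if p.1 = k then (p.1, f p.2) else p) := by
  show (d.insert k (f (d.getD k 0))).items = _
  rw [PySem.Dict.items_insert_of_contains d _ hc]
  apply List.map_congr_left
  intro p hp
  by_cases hpk : p.1 = k
  · have : d.getD k 0 = p.2 := by
      have hmem : (k, p.2) ∈ d.items := by rwa [← hpk]
      exact PySem.Dict.getD_of_mem_items d hmem hnd 0
    simp [hpk, this]
  · simp [hpk]

lemma keys_modify_present (d : PySem.Dict Int Int) (k : Int) (f : Int → Int)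
    (hc : d.contains k = true) :
    (d.modify k 0 f).keys = d.keys := by
  rw [PySem.Dict.keys_modify, PySem.Dict.keys_insert_of_contains _ _ hc]

lemma foldl_modify_items (f : Int → Int) : ∀ (ks : List Int) (d : PySem.Dict Int Int),
    ks.Nodup → (∀ k ∈ ks, d.contains k = true) → d.keys.Nodup →
    (ks.foldl (fun d k => d.modify k 0 f) d).items
      = d.items.map (fun p => if p.1 ∈ ks then (p.1, f p.2) else p) := by
  intro ks
  induction ks with
  | nil => intro d _ _ _; simp
  | cons k ks ih =>
    intro d hnd hcon hkd
    have hck : d.contains k = true := hcon k (by simp)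
    have hknotin : k ∉ ks := (List.nodup_cons.mp hnd).1
    have hkeys : (d.modify k 0 f).keys = d.keys := keys_modify_present d k f hck
    have hcon' : ∀ k' ∈ ks, (d.modify k 0 f).contains k' = true := by
      intro k' hk'
      rw [PySem.Dict.contains_modify]
      simp [hcon k' (by simp [hk'])]
    simp only [List.foldl_cons]
    rw [ih (d.modify k 0 f) (List.nodup_cons.mp hnd).2 hcon' (hkeys ▸ hkd),
        items_modify_present d k f hck hkd, List.map_map]
    apply List.map_congr_left
    intro p _
    by_cases hpk : p.1 = k
    · simp [hpk, hknotin, Function.comp]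
    · by_cases hpks : p.1 ∈ ks <;> simp [hpk, hpks, Function.comp]

-- inserting a page that is not resident, after the optional eviction: shared by the two miss branches
lemma insert_fresh_inv (t page : Int) (fa2 : PySem.Dict Int Bool) (ag2 : PySem.Dict Int Int)
    (fb2 : PySem.Dict Int (Int × Int)) (G : List (Int × Int × Int))
    (hfb2 : fb2.items = G)
    (hfa2 : fa2.items = G.map (fun p => (p.1, true)))
    (hag2 : ag2.items = G.map (fun (p : Int × Int × Int) => (p.1, p.2.1 >>> (t - p.2.2).toNat)))
    (hlast2 : ∀ p ∈ G, p.2.2 ≤ t - 1)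
    (hnd2 : (G.map (·.1)).Nodup)
    (hpage : page ∉ G.map (·.1)) :
    AgingInv (t + 1) (fa2.insert page true) (ag2.insert page (1 <<< 7))
      (fb2.insert page (1 <<< 7, t)) := by
  have hkfa2 : fa2.keys = G.map (·.1) := by
    show fa2.items.map (·.1) = _
    simp [hfa2, List.map_map, Function.comp]
  have hkag2 : ag2.keys = G.map (·.1) := by
    show ag2.items.map (·.1) = _
    simp [hag2, List.map_map, Function.comp]
  have hkfb2 : fb2.keys = G.map (·.1) := by
    show fb2.items.map (·.1) = _
    simp [hfb2]
  have hca : fa2.contains page = false := by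
    rw [PySem.Dict.contains_eq_decide_mem_keys, hkfa2]; simpa using hpage
  have hcg : ag2.contains page = false := by
    rw [PySem.Dict.contains_eq_decide_mem_keys, hkag2]; simpa using hpage
  have hcb : fb2.contains page = false := by
    rw [PySem.Dict.contains_eq_decide_mem_keys, hkfb2]; simpa using hpage
  have harith : ∀ l : Int, t + 1 - 1 - l = t - l := by intro l; ring
  refine ⟨?_, ?_, ?_, ?_⟩
  · rw [PySem.Dict.items_insert_of_not_contains _ _ hca,
        PySem.Dict.items_insert_of_not_contains _ _ hcb, hfa2, hfb2, List.map_append]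
    simp
  · rw [PySem.Dict.items_insert_of_not_contains _ _ hcg,
        PySem.Dict.items_insert_of_not_contains _ _ hcb, hag2, hfb2, List.map_append]
    simp only [harith, List.map_cons, List.map_nil, Int.sub_self, Int.toNat_zero,
      Int.shiftRight_zero]
  · intro p hp
    rw [PySem.Dict.items_insert_of_not_contains _ _ hcb, hfb2] at hp
    rcases List.mem_append.mp hp with hp | hp
    · have := hlast2 p hp; omega
    · simp at hp; subst hp; simp
  · rw [PySem.Dict.keys_insert_of_not_contains _ _ hcb, hkfb2]
    simp only [List.nodup_append, hnd2, true_and, List.nodup_cons, List.not_mem_nil,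
      not_false_iff, List.nodup_nil, and_true]
    intro a ha b hb
    rcases List.mem_singleton.mp hb with rfl
    intro h
    subst h
    exact hpage ha

lemma aging_step_inv (nf t page : Int) (fa : PySem.Dict Int Bool) (ag : PySem.Dict Int Int)
    (fb : PySem.Dict Int (Int × Int)) (c : Int) (h : AgingInv t fa ag fb) :
    AgingInv (t + 1) (agingStep nf (fa, c, ag) page).1 (agingStep nf (fa, c, ag) page).2.2
        ((agingAltStep nf (fb, c) (t, page)).1) ∧
      (agingStep nf (fa, c, ag) page).2.1 = (agingAltStep nf (fb, c) (t, page)).2 := by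
  obtain ⟨hfa, hag, hlast, hnd⟩ := h
  have hndk : (fb.items.map (·.1)).Nodup := hnd
  have hkfa : fa.keys = fb.items.map (·.1) := by
    show fa.items.map (·.1) = _
    simp [hfa, List.map_map, Function.comp]
  have hkag : ag.keys = fb.items.map (·.1) := by
    show ag.items.map (·.1) = _
    simp [hag, List.map_map, Function.comp]
  have hcontag : ∀ k ∈ fa.keys, ag.contains k = true := by
    intro k hk
    rw [PySem.Dict.contains_eq_decide_mem_keys, hkag]
    rw [hkfa] at hk
    simpa using hk
  have hndks : fa.keys.Nodup := by rw [hkfa]; exact hndk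
  have hagnd : ag.keys.Nodup := by rw [hkag]; exact hndk
  have hag1 : (fa.keys.foldl (fun d frame => d.modify frame 0 (fun v => v >>> (1:Nat))) ag).items
      = ag.items.map (fun (p : Int × Int) => (p.1, p.2 >>> (1:Nat))) := by
    rw [foldl_modify_items _ fa.keys ag hndks hcontag hagnd]
    apply List.map_congr_left
    intro p hp
    have hpk : p.1 ∈ fa.keys := by
      rw [hkfa]
      rw [hag] at hp
      obtain ⟨q, hq, rfl⟩ := List.mem_map.mp hp
      exact List.mem_map_of_mem hq
    simp [hpk]
  set ag' := fa.keys.foldl (fun d frame => d.modify frame 0 (fun v => v >>> (1:Nat))) ag with hag'def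
  have hag2 : ag'.items = fb.items.map (fun (p : Int × Int × Int) => (p.1, p.2.1 >>> (t - p.2.2).toNat)) := by
    rw [hag1, hag, List.map_map]
    apply List.map_congr_left
    intro p hp
    have hb := hlast p hp
    simp only [Function.comp]
    have harith : (t - 1 - p.2.2).toNat + 1 = (t - p.2.2).toNat := by omega
    rw [← harith, Int.shiftRight_add]
  have hkag' : ag'.keys = fb.items.map (·.1) := by
    show ag'.items.map (·.1) = _
    simp [hag2, List.map_map, Function.comp]
  have hag'nd : ag'.keys.Nodup := by rw [hkag']; exact hndk
  have hsz : fa.size = fb.size := by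
    show fa.items.length = fb.items.length
    rw [hfa]; simp
  have harith1 : ∀ l : Int, t + 1 - 1 - l = t - l := by intro l; ring
  cases hget : fb.get? page with
  | some e =>
    obtain ⟨reg, last⟩ := e
    have hmem : (page, (reg, last)) ∈ fb.items := PySem.Dict.mem_items_of_get?_eq_some fb hget
    have hpagemem : page ∈ fb.items.map (·.1) := by
      simpa using List.mem_map_of_mem (f := (·.1)) hmem
    have hcafa : fa.contains page = true := by
      rw [PySem.Dict.contains_eq_decide_mem_keys, hkfa]
      simpa using hpagemem
    have hcfb : fb.contains page = true := by
      rw [PySem.Dict.contains_eq_isSome_get?, hget]; rfl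
    have hcag' : ag'.contains page = true := by
      rw [PySem.Dict.contains_eq_decide_mem_keys, hkag']
      simpa using hpagemem
    have huniq : ∀ p ∈ fb.items, p.1 = page → p = (page, (reg, last)) := by
      intro p hp hk
      exact List.inj_on_of_nodup_map hndk hp hmem (by simpa using hk)
    simp only [agingStep, agingAltStep, hget, hcafa, ← hag'def]
    norm_num
    refine ⟨?_, ?_, ?_, ?_⟩
    · rw [PySem.Dict.items_insert_of_contains fb _ hcfb, hfa, List.map_map]
      apply List.map_congr_left
      intro p hp
      by_cases hpk : p.1 = page <;> simp [Function.comp, hpk]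
    · rw [items_modify_present ag' page _ hcag' hag'nd,
          PySem.Dict.items_insert_of_contains fb _ hcfb, hag2, List.map_map, List.map_map]
      apply List.map_congr_left
      intro p hp
      by_cases hpk : p.1 = page
      · obtain rfl := huniq p hp hpk
        simp [Function.comp]
      · simp only [Function.comp, harith1]
        simp [hpk]
    · intro p hp
      rw [PySem.Dict.items_insert_of_contains fb _ hcfb] at hp
      obtain ⟨q, hq, rfl⟩ := List.mem_map.mp hp
      by_cases hqk : q.1 = page
      · simp only [hqk, beq_self_eq_true, if_true]
        omega
      · have := hlast q hq
        simp only [beq_iff_eq, hqk, if_false]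
        omega
    · have key : ∀ (w : Int × Int), ((fb.insert page w).items.map (·.1)).Nodup := by
        intro w
        rw [PySem.Dict.items_insert_of_contains fb _ hcfb, List.map_map]
        have heq : (fb.items.map ((·.1) ∘ (fun p => if p.1 == page then (page, w) else p)))
            = fb.items.map (·.1) := by
          apply List.map_congr_left
          intro p hp
          by_cases hpk : p.1 = page <;> simp [Function.comp, hpk]
        rw [heq]
        exact hndk
      exact key _
  | none =>
    have hnotmem : page ∉ fb.items.map (·.1) := by
      intro hmem
      obtain ⟨q, hq, hqe⟩ := List.mem_map.mp hmem
      have : fb.contains page = true := by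
        rw [PySem.Dict.contains_eq_decide_mem_keys]
        show decide (page ∈ fb.items.map (·.1)) = true
        simpa using hmem
      rw [PySem.Dict.contains_eq_isSome_get?, hget] at this
      simp at this
    have hcafa : fa.contains page = false := by
      rw [PySem.Dict.contains_eq_decide_mem_keys, hkfa]
      simpa using hnotmem
    simp only [agingStep, agingAltStep, hget, hcafa, ← hag'def]
    norm_num
    rw [hsz]
    by_cases hc1 : nf ≤ (fb.size : Int)
    · simp only [if_pos hc1]
      have hmin : PySem.List.min? ag'.keys (fun k => ag'.getD k 0)
          = Option.map (·.1) (PySem.List.min? fb.items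
              (fun (kv : Int × Int × Int) => kv.2.1 >>> (t - kv.2.2).toNat)) := by
        rw [hkag', min?_map]
        congr 1
        apply min?_congr_mem
        intro p hp
        have hm : (p.1, p.2.1 >>> (t - p.2.2).toNat) ∈ ag'.items := by
          rw [hag2]; exact List.mem_map_of_mem hp
        exact PySem.Dict.getD_of_mem_items ag' hm hag'nd 0
      rw [hmin]
      cases hv : PySem.List.min? fb.items
          (fun (kv : Int × Int × Int) => kv.2.1 >>> (t - kv.2.2).toNat) with
      | none =>
        simp only [Option.map_none]
        exact ⟨insert_fresh_inv t page fa ag' fb fb.items rfl hfa hag2 hlast hndk hnotmem, trivial⟩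
      | some v =>
        simp only [Option.map_some]
        have hvmem : v ∈ fb.items := PySem.List.min?_mem hv
        refine ⟨?_, trivial⟩
        have hG' : (fb.erase v.1).items = fb.items.filter (fun p => !(p.1 == v.1)) := rfl
        have hfaE : (fa.erase v.1).items
            = (fb.items.filter (fun p => !(p.1 == v.1))).map (fun p => (p.1, true)) := by
          show fa.items.filter _ = _
          rw [hfa, List.filter_map]
          congr 1
        have hagE : (ag'.erase v.1).items
            = (fb.items.filter (fun p => !(p.1 == v.1))).map
                (fun (p : Int × Int × Int) => (p.1, p.2.1 >>> (t - p.2.2).toNat)) := by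
          show ag'.items.filter _ = _
          rw [hag2, List.filter_map]
          congr 1
        have hsub : (fb.items.filter (fun p => !(p.1 == v.1))).Sublist fb.items :=
          List.filter_sublist
        refine insert_fresh_inv t page (fa.erase v.1) (ag'.erase v.1) (fb.erase v.1)
          (fb.items.filter (fun p => !(p.1 == v.1))) hG' hfaE hagE
          (fun p hp => hlast p (hsub.mem hp))
          ((hsub.map (·.1)).nodup hndk)
          (fun hmem => hnotmem ((hsub.map (·.1)).mem hmem))
    · simp only [if_neg hc1]
      exact ⟨insert_fresh_inv t page fa ag' fb fb.items rfl hfa hag2 hlast hndk hnotmem, trivial⟩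

lemma aging_fold_inv (nf : Int) : ∀ (xs : List Int) (t : Int) (fa : PySem.Dict Int Bool)
    (ag : PySem.Dict Int Int) (fb : PySem.Dict Int (Int × Int)) (c : Int),
    AgingInv t fa ag fb →
    (xs.foldl (agingStep nf) (fa, c, ag)).2.1
      = ((PySem.List.enumerate xs t).foldl (agingAltStep nf) (fb, c)).2 := by
  intro xs
  induction xs with
  | nil => intro t fa ag fb c _; rfl
  | cons x xs ih =>
    intro t fa ag fb c h
    obtain ⟨hinv, hc⟩ := aging_step_inv nf t x fa ag fb c h
    rw [PySem.List.enumerate_cons]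
    simp only [List.foldl_cons]
    rw [show agingAltStep nf (fb, c) (t, x)
          = ((agingAltStep nf (fb, c) (t, x)).1, (agingStep nf (fa, c, ag) x).2.1) from by rw [hc]]
    exact ih (t + 1) (agingStep nf (fa, c, ag) x).1 (agingStep nf (fa, c, ag) x).2.2
      (agingAltStep nf (fb, c) (t, x)).1 (agingStep nf (fa, c, ag) x).2.1 hinv

-- ===== VERDICT (by name: the statement is the Claim_ definition above) =====
theorem aging_spec : Claim_equal_aging := by
  intro xs nf _ _
  unfold Spec_aging aging aging_alt
  exact aging_fold_inv nf xs 0 PySem.Dict.empty PySem.Dict.empty PySem.Dict.empty 0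
    (by refine ⟨rfl, rfl, ?_, ?_⟩ <;> simp [PySem.Dict.empty, PySem.Dict.keys])
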